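-- pv_equiv track=rewrite | github.com/skylarr1227/skybizzle | cogs/Downloader/lib/cog_shared/swift_libs/translations/utils.py | closest_locale
-- ===== SOURCE A (Python) =====
-- from typing import Optional, List, Tuple, Dict, Union, Iterable, Sequence, Any, Callable
--
-- def closest_locale(
--     locale: str,
--     available: Iterable[str],
--     separator: str = "-",
--     replace_with_separator: Iterable[str] = None,
--     default: Any = None,
-- ) -> Optional[str]:
--     """Match a given locale to a known locale on disk on a close-enough basis"""
--     if replace_with_separator is None:
--         replace_with_separator = ["_"]
--
--     # [(check against, original), ...]
--     available: List[Tuple[str, str]] = [(x, x) for x in available]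
--
--     for replace in replace_with_separator:
--         locale = locale.replace(replace, separator)
--         available = [(x.replace(replace, separator), y) for x, y in available]
--
--     locale = locale.lower()
--     available = [(x.lower(), y) for x, y in available]
--
--     try:
--         # try to find an exact match before anything else
--         return next(unmodified for straw, unmodified in available if straw == locale)
--     except StopIteration:
--         # if there are no exact matches, fall back to trying to match just the language code,
--         # ignoring the region entirely, such as matching `en-GB` to `en-US`
--         return next(
--             (
--                 unmodified
--                 for straw, unmodified in available
--                 if straw.split(separator)[0] == locale.split(separator)[0]
--             ),
--             default,
--         )
-- ===== SOURCE B (Python) =====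
-- def closest_locale(
--     locale,
--     available,
--     separator="-",
--     replace_with_separator=None,
--     default=None,
-- ):
--     """Match a given locale to a known locale on disk on a close-enough basis"""
--     if replace_with_separator is None:
--         replace_with_separator = ["_"]
--
--     def norm(s):
--         for replace in replace_with_separator:
--             s = s.replace(replace, separator)
--         return s.lower()
--
--     def head(s):
--         # part before the first occurrence of the separator (whole string if absent)
--         i = s.find(separator)
--         return s if i < 0 else s[:i]
--
--     target = norm(locale)
--     target_head = head(target)
--
--     fallback = None
--     for orig in available:
--         n = norm(orig)
--         if n == target:
--             return orig
--         if fallback is None and head(n) == target_head: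
--             fallback = orig
--     return fallback if fallback is not None else default
-- ===== Notes on version B (the rewrite author's own statement) =====
-- stated objective: simpler
-- what changed: B normalizes each candidate on the fly in a single pass with a fallback accumulator (exact match returns immediately, first prefix match is remembered) and takes the language-code prefix via str.find instead of split, instead of A's materialized (normalized, original) pair list rebuilt once per replacement plus two separate generator scans.
-- outside the precondition, e.g. on closest_locale('en', ['en'], '', None, None): A returns 'en', B returns 'en'; on closest_locale('en', [], '', None, None): A returns None, B returns None
import Mathlib
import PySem

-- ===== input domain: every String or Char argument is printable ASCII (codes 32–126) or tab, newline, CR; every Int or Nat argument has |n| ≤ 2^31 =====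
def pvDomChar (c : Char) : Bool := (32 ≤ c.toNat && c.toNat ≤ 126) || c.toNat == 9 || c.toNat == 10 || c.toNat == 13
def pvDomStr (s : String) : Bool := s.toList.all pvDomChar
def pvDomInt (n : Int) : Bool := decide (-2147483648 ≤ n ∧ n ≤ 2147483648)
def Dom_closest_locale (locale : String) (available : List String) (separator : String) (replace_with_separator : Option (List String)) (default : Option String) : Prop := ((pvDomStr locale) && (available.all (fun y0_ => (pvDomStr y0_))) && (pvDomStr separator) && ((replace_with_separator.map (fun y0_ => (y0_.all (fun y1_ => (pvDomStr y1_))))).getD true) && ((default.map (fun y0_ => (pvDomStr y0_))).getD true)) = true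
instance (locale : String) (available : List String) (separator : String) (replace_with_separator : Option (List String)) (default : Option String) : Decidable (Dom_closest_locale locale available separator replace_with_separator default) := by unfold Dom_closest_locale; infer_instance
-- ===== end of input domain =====

-- B replaces A's materialized (normalized, original) pair lists and two separate scans by a single
-- pass that normalizes each candidate on the fly, remembers the first prefix match as a fallback,
-- and takes the language-code prefix with str.find instead of str.split (objective: simpler).
-- Return-value equivalence only; neither version mutates its arguments.


-- ===== PORT A =====
-- A's `s.split(separator)[0]` — exact for separator ≠ "" (separator = "" raises ValueError in
-- Python and is excluded by Pre_closest_locale; the getD/headD defaults there are never relied on)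
def pySplitHead (s sep : String) : String :=
  ((PySem.Str.split? s sep).getD [s]).headD s

def closest_locale (locale : String) (available : List String) (separator : String) (replace_with_separator : Option (List String)) (default : Option String) : Option String :=
  let rws := replace_with_separator.getD ["_"]
  let avail : List (String × String) := available.map (fun x => (x, x))
  -- `for replace in replace_with_separator: ...` updating locale and available together
  let st := rws.foldl
    (fun (st : String × List (String × String)) r =>
      (PySem.Str.replace st.1 r separator,
       st.2.map (fun p => (PySem.Str.replace p.1 r separator, p.2))))
    (locale, avail)
  let locale := PySem.Str.lower st.1
  let avail := st.2.map (fun p => (PySem.Str.lower p.1, p.2))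
  match avail.find? (fun p => p.1 == locale) with
  | some p => some p.2
  | none =>
    match avail.find? (fun p => pySplitHead p.1 separator == pySplitHead locale separator) with
    | some p => some p.2
    | none => default

-- ===== PORT B =====
-- norm(s): apply each replacement, then lowercase
def pvNorm (rws : List String) (separator s : String) : String :=
  PySem.Str.lower (rws.foldl (fun t r => PySem.Str.replace t r separator) s)

-- head(s): `i = s.find(separator); return s if i < 0 else s[:i]`
def pvHeadB (separator s : String) : String :=
  let i := PySem.Str.find s separator
  if i < 0 then s else PySem.Str.slice s none (some i)

-- the single scan: exact match returns at once, first prefix match is remembered in `fallback`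
def pvLoop (rws : List String) (separator target thead : String) (default : Option String) :
    List String → Option String → Option String
  | [], fallback => match fallback with | some f => some f | none => default
  | x :: rest, fallback =>
    let n := pvNorm rws separator x
    if n == target then some x
    else if fallback.isNone && (pvHeadB separator n == thead) then
      pvLoop rws separator target thead default rest (some x)
    else
      pvLoop rws separator target thead default rest fallback

def closest_locale_alt (locale : String) (available : List String) (separator : String) (replace_with_separator : Option (List String)) (default : Option String) : Option String :=
  let rws := replace_with_separator.getD ["_"]
  let target := pvNorm rws separator locale
  let thead := pvHeadB separator target
  pvLoop rws separator target thead default available none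

-- ===== PRECONDITION & SPEC =====
-- Pre_ excludes the empty separator, on which A's `split` raises ValueError as soon as the prefix
-- fallback condition is evaluated (i.e. whenever no exact match exists and `available` is
-- nonempty); on the excluded inputs where A does return (an exact match, or an empty `available`)
-- B returns the same value, and where A raises B returns a value via its find-based head.
def Pre_closest_locale (locale : String) (available : List String) (separator : String) (replace_with_separator : Option (List String)) (default : Option String) : Prop :=
  separator ≠ ""
instance (locale : String) (available : List String) (separator : String) (replace_with_separator : Option (List String)) (default : Option String) : Decidable (Pre_closest_locale locale available separator replace_with_separator default) := by unfold Pre_closest_locale; infer_instance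

def pvWitness_closest_locale : String × List String × String × Option (List String) × Option String :=
  ("en_GB", ["fr", "en-US"], "-", none, some "en")

def Spec_closest_locale (locale : String) (available : List String) (separator : String) (replace_with_separator : Option (List String)) (default : Option String) (out : Option String) : Prop := out = closest_locale_alt locale available separator replace_with_separator default
instance (locale : String) (available : List String) (separator : String) (replace_with_separator : Option (List String)) (default : Option String) (out : Option String) : Decidable (Spec_closest_locale locale available separator replace_with_separator default out) := by unfold Spec_closest_locale; infer_instance

-- ===== CLAIM (what is proved, stated in full; the proofs are below) =====
def Claim_equal_closest_locale : Prop := ∀ (locale : String) (available : List String) (separator : String) (replace_with_separator : Option (List String)) (default : Option String), Dom_closest_locale locale available separator replace_with_separator default → Pre_closest_locale locale available separator replace_with_separator default → Spec_closest_locale locale available separator replace_with_separator default (closest_locale locale available separator replace_with_separator default)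

-- ===== LEMMAS AND PROOFS =====

-- A's replacement loop over the pair state, characterised: the first component folds the
-- replacements over the locale, and each list entry folds them over its own first component.
theorem pvFold_pairs (separator : String) (rws : List String) (l : String)
    (xs : List String) (g : String → String) :
    rws.foldl
      (fun (st : String × List (String × String)) r =>
        (PySem.Str.replace st.1 r separator,
         st.2.map (fun p => (PySem.Str.replace p.1 r separator, p.2))))
      (l, xs.map (fun x => (g x, x)))
    = (rws.foldl (fun t r => PySem.Str.replace t r separator) l,
       xs.map (fun x => (rws.foldl (fun t r => PySem.Str.replace t r separator) (g x), x))) := by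
  induction rws generalizing l g with
  | nil => simp
  | cons r rs ih =>
    simp only [List.foldl_cons, List.map_map]
    exact ih (PySem.Str.replace l r separator) (fun x => PySem.Str.replace (g x) r separator)

-- B's scan, characterised against the two find? passes of A
theorem pvLoop_eq (rws : List String) (separator target thead : String)
    (default : Option String) (l : List String) (fallback : Option String) :
    pvLoop rws separator target thead default l fallback
    = match l.find? (fun x => pvNorm rws separator x == target) with
      | some x => some x
      | none =>
        match fallback with
        | some f => some f
        | none =>
          match l.find? (fun x => pvHeadB separator (pvNorm rws separator x) == thead) with
          | some x => some x
          | none => default := by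
  induction l generalizing fallback with
  | nil => cases fallback <;> simp [pvLoop]
  | cons x rest ih =>
    by_cases hx : (pvNorm rws separator x == target) = true
    · simp [pvLoop, hx, List.find?_cons]
    · have hx' : (pvNorm rws separator x == target) = false := by simp [hx]
      cases fallback with
      | some f =>
        simp only [pvLoop, hx', Option.isNone_some, Bool.false_and, if_false, List.find?_cons,
          cond_false]
        exact (ih (some f)).trans (by simp)
      | none =>
        by_cases hp : (pvHeadB separator (pvNorm rws separator x) == thead) = true
        · simp only [pvLoop, hx', Option.isNone_none, Bool.true_and, hp, if_true, if_false,
            List.find?_cons, cond_false, cond_true]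
          exact (ih (some x)).trans (by simp)
        · have hp' : (pvHeadB separator (pvNorm rws separator x) == thead) = false := by
            simp [hp]
          simp only [pvLoop, hx', Option.isNone_none, Bool.true_and, hp', if_false,
            List.find?_cons, cond_false]
          exact ih none

-- proof-side helper: the characters before the first occurrence of sep (the whole list if absent)
def pvBeforeSep (sep : List Char) : List Char → List Char
  | [] => []
  | c :: rest => if sep.isPrefixOf (c :: rest) then [] else c :: pvBeforeSep sep rest

-- PySem.Chars.find.go at a shifted start index
theorem pvFindGo_shift (sep : List Char) (hsep : sep ≠ []) (r : List Char) (k : Nat) :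
    PySem.Chars.find.go sep r k
      = if PySem.Chars.find.go sep r 0 = -1 then -1 else PySem.Chars.find.go sep r 0 + k := by
  induction r generalizing k with
  | nil =>
    rw [PySem.Chars.find.go]
    simp [List.isEmpty_iff, hsep, PySem.Chars.find.go]
  | cons c rest ih =>
    rw [PySem.Chars.find.go]
    by_cases hp : sep.isPrefixOf (c :: rest) = true
    · have h0 : PySem.Chars.find.go sep (c :: rest) 0 = 0 := by
        rw [PySem.Chars.find.go]; simp [hp]
      simp [hp, h0]
    · have hfe : PySem.Chars.find.go sep (c :: rest) 0 = PySem.Chars.find.go sep rest 1 := by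
        rw [PySem.Chars.find.go]; simp [hp]
      have hge : (-1 : Int) ≤ PySem.Chars.find.go sep rest 0 := by
        have := PySem.Chars.neg_one_le_find rest sep
        simpa [PySem.Chars.find] using this
      rw [hfe, ih (k + 1), ih 1]
      simp only [hp]
      by_cases hm : PySem.Chars.find.go sep rest 0 = -1
      · simp [hm]
      · have h1 : ¬ PySem.Chars.find.go sep rest 0 + 1 = -1 := by omega
        rw [if_neg (by simp)]
        push_cast
        simp only [hm, if_false, h1]
        ring

-- B's find-based head, computed structurally
theorem pvFindHead_eq (sep : List Char) (hsep : sep ≠ []) (l : List Char) :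
    (if PySem.Chars.find l sep = -1 then l else l.take (PySem.Chars.find l sep).toNat)
      = pvBeforeSep sep l := by
  induction l with
  | nil =>
    have : PySem.Chars.find [] sep = -1 := by
      rw [PySem.Chars.find_eq_neg_one_iff]
      simp [List.infix_nil, hsep]
    simp [this, pvBeforeSep]
  | cons c rest ih =>
    by_cases hp : sep.isPrefixOf (c :: rest) = true
    · have h0 : PySem.Chars.find (c :: rest) sep = 0 := by
        show PySem.Chars.find.go sep (c :: rest) 0 = 0
        rw [PySem.Chars.find.go]; simp [hp]
      simp [h0, pvBeforeSep, hp]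
    · have hfe : PySem.Chars.find (c :: rest) sep
          = if PySem.Chars.find rest sep = -1 then -1 else PySem.Chars.find rest sep + 1 := by
        show PySem.Chars.find.go sep (c :: rest) 0 = _
        rw [PySem.Chars.find.go]
        simp only [hp, if_false]
        simpa [PySem.Chars.find] using pvFindGo_shift sep hsep rest 1
      have hge : (-1 : Int) ≤ PySem.Chars.find rest sep := PySem.Chars.neg_one_le_find rest sep
      by_cases hm : PySem.Chars.find rest sep = -1
      · simp only [hfe, hm, if_true, pvBeforeSep, hp, if_false]
        simpa [hm] using ih
      · have hnn : (0 : Int) ≤ PySem.Chars.find rest sep := by omega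
        have hne : ¬ PySem.Chars.find rest sep + 1 = -1 := by omega
        have htn : (PySem.Chars.find rest sep + 1).toNat = (PySem.Chars.find rest sep).toNat + 1 := by
          omega
        simp only [hfe, hm, if_false, hne, if_false, pvBeforeSep, hp, if_false, htn, List.take_succ_cons]
        simpa [hm] using ih

-- splitOn.go: the accumulator only prepends (reversed) to the final result
theorem pvSplitGo_acc (sep : List Char) (fuel : Nat) (l cur : List Char)
    (acc : List (List Char)) :
    PySem.Chars.splitOn.go sep fuel l cur acc
      = acc.reverse ++ PySem.Chars.splitOn.go sep fuel l cur [] := by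
  induction fuel generalizing l cur acc with
  | zero =>
    rw [PySem.Chars.splitOn.go, PySem.Chars.splitOn.go]
    simp
  | succ fuel ih =>
    cases l with
    | nil =>
      rw [PySem.Chars.splitOn.go, PySem.Chars.splitOn.go] <;> try omega
      simp
    | cons c rest =>
      rw [PySem.Chars.splitOn.go]
      conv_rhs => rw [PySem.Chars.splitOn.go]
      by_cases hp : sep.isPrefixOf (c :: rest) = true
      · simp only [hp, if_true]
        rw [ih, ih _ _ [cur.reverse]]
        simp
      · simp only [hp, if_false]
        exact ih _ _ _

-- the first piece splitOn.go produces is the input up to the first separator occurrence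
theorem pvSplitGo_head (sep : List Char) (hsep : sep ≠ []) (fuel : Nat) :
    ∀ l cur : List Char, l.length < fuel →
    (PySem.Chars.splitOn.go sep fuel l cur []).head? = some (cur.reverse ++ pvBeforeSep sep l) := by
  induction fuel with
  | zero => intro l cur h; omega
  | succ fuel ih =>
    intro l cur h
    cases l with
    | nil =>
      rw [PySem.Chars.splitOn.go] <;> try omega
      simp [pvBeforeSep]
    | cons c rest =>
      rw [PySem.Chars.splitOn.go]
      by_cases hp : sep.isPrefixOf (c :: rest) = true
      · simp only [hp, if_true]
        rw [pvSplitGo_acc]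
        simp [pvBeforeSep, hp]
      · rw [if_neg (by simp [hp])]
        rw [ih rest (c :: cur) (by simpa using Nat.lt_of_succ_lt_succ h)]
        simp [pvBeforeSep, hp]

-- under Pre_ (separator ≠ ""), A's split-based head and B's find-based head agree
theorem pvHead_agree (separator : String) (hsep : separator ≠ "") (s : String) :
    pvHeadB separator s = pySplitHead s separator := by
  have hsep' : separator.toList ≠ [] := by
    intro h; apply hsep
    have := congrArg String.ofList h
    simpa using this
  -- A side: reduce to splitOn.go and pvBeforeSep
  have hA : pySplitHead s separator = String.ofList (pvBeforeSep separator.toList s.toList) := by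
    unfold pySplitHead
    rw [PySem.Str.split?]
    rw [PySem.Chars.split?]
    simp only [List.isEmpty_iff, hsep', if_false, Option.map_some, Option.getD_some]
    rw [PySem.Chars.splitOn]
    have hh := pvSplitGo_head separator.toList hsep' (s.toList.length + 1) s.toList []
      (by omega)
    cases hgo : PySem.Chars.splitOn.go separator.toList (s.toList.length + 1) s.toList [] [] with
    | nil => rw [hgo] at hh; simp at hh
    | cons a tl =>
      rw [hgo] at hh
      simp only [List.head?_cons, Option.some.injEq] at hh
      simp [hh]
  -- B side: reduce find/slice to the same pvBeforeSep
  have hB : pvHeadB separator s = String.ofList (pvBeforeSep separator.toList s.toList) := by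
    unfold pvHeadB
    have hfind : PySem.Str.find s separator = PySem.Chars.find s.toList separator.toList := by
      simp
    have hge : (-1 : Int) ≤ PySem.Chars.find s.toList separator.toList :=
      PySem.Chars.neg_one_le_find _ _
    have hkey := pvFindHead_eq separator.toList hsep' s.toList
    by_cases hm : PySem.Chars.find s.toList separator.toList = -1
    · have hlt : PySem.Str.find s separator < 0 := by rw [hfind, hm]; omega
      simp only [hlt, if_true]
      rw [← hkey]
      simp [hm]
    · have hnn : (0 : Int) ≤ PySem.Chars.find s.toList separator.toList := by omega
      have hlt : ¬ PySem.Str.find s separator < 0 := by rw [hfind]; omega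
      simp only [hlt, if_false]
      have hsl : (PySem.Str.slice s none (some (PySem.Str.find s separator))).toList
          = s.toList.take (PySem.Chars.find s.toList separator.toList).toNat := by
        rw [hfind]
        simp [PySem.Str.slice, PySem.List.slice_to s.toList hnn]
      have : PySem.Str.slice s none (some (PySem.Str.find s separator))
          = String.ofList (s.toList.take (PySem.Chars.find s.toList separator.toList).toNat) := by
        have := congrArg String.ofList hsl
        simpa using this
      rw [this, ← hkey]
      simp [hm]
  rw [hA, hB]

-- ===== VERDICT (by name: the statement is the Claim_ definition above) =====
theorem closest_locale_spec : Claim_equal_closest_locale := by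
  intro locale available separator rws default _ hsep
  unfold Spec_closest_locale closest_locale closest_locale_alt
  rw [pvLoop_eq]
  simp only [pvHead_agree separator hsep]
  have hf := pvFold_pairs separator (rws.getD ["_"]) locale available (fun x => x)
  simp only [hf, List.map_map, List.find?_map, Function.comp_def, pvNorm]
  cases h1 : available.find?
      (fun x => PySem.Str.lower ((rws.getD ["_"]).foldl
        (fun t r => PySem.Str.replace t r separator) x)
        == PySem.Str.lower ((rws.getD ["_"]).foldl
        (fun t r => PySem.Str.replace t r separator) locale)) with
  | some x => simp [h1]
  | none =>
    simp only [h1, Option.map_none]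
    cases h2 : available.find?
        (fun x => pySplitHead (PySem.Str.lower ((rws.getD ["_"]).foldl
          (fun t r => PySem.Str.replace t r separator) x)) separator
          == pySplitHead (PySem.Str.lower ((rws.getD ["_"]).foldl
          (fun t r => PySem.Str.replace t r separator) locale)) separator) with
    | some x => simp [h2]
    | none => simp [h2]
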